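-- pv_equiv track=rewrite | github.com/dp-web4/HRM | sage/raising/scripts/filter_collapsed_experiences.py | filter_collapsed
-- ===== SOURCE A (Python) =====
-- def detect_collapse_patterns(response: str) -> tuple[bool, str]:
--     """
--     Detect collapse patterns in response text.
--
--     Returns:
--         (is_collapsed, reason)
--     """
--     # Pattern 1: Repetitive phrases (same phrase 3+ times)
--     words = response.lower().split()
--     if len(words) > 20:
--         # Check for phrase repetition
--         phrase_len = 5
--         phrases = [' '.join(words[i:i+phrase_len]) for i in range(len(words) - phrase_len)]
--         phrase_counts = {}
--         for p in phrases:
--             phrase_counts[p] = phrase_counts.get(p, 0) + 1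
--
--         max_repeat = max(phrase_counts.values()) if phrase_counts else 0
--         if max_repeat >= 3:
--             return True, f"repetitive_phrase (repeated {max_repeat}x)"
--
--     # Pattern 2: Question flood (too many questions)
--     question_count = response.count('?')
--     if question_count > 10:
--         return True, f"question_flood ({question_count} questions)"
--
--     # Pattern 3: Task switch (code generation in conversation)
--     code_markers = ['def ', 'function ', 'class ', 'import ', '```python', '```javascript']
--     if any(marker in response.lower() for marker in code_markers):
--         # Check if this is supposed to be conversation
--         if 'Write a' in response or 'Create a' in response:
--             return True, "task_switch_to_code"
--
--     return False, ""
--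
-- def filter_collapsed(experiences: list, dry_run: bool = True) -> tuple[list, list]:
--     """
--     Filter experiences with collapse patterns.
--
--     Returns:
--         (filtered_experiences, removed_experiences)
--     """
--     filtered = []
--     removed = []
--
--     for exp in experiences:
--         is_collapsed, reason = detect_collapse_patterns(exp.get('response', ''))
--         if is_collapsed:
--             exp['filter_reason'] = reason
--             removed.append(exp)
--         else:
--             filtered.append(exp)
--
--     return filtered, removed
-- ===== SOURCE B (Python) =====
-- def _collapse_reason(response):
--     """Return the filter reason, or None if the response looks fine."""
--     lowered = response.lower()
--     words = lowered.split()
--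
--     if len(words) > 20:
--         # Sort the 5-word windows and scan once: the longest run of equal
--         # adjacent phrases is the highest repetition count.
--         runs = sorted(' '.join(words[i:i + 5]) for i in range(len(words) - 5))
--         max_repeat = 0
--         run = 0
--         prev = None
--         for p in runs:
--             run = run + 1 if p == prev else 1
--             prev = p
--             if run > max_repeat:
--                 max_repeat = run
--         if max_repeat >= 3:
--             return f"repetitive_phrase (repeated {max_repeat}x)"
--
--     question_count = response.count('?')
--     if question_count > 10:
--         return f"question_flood ({question_count} questions)"
--
--     markers = ('def ', 'function ', 'class ', 'import ', '```python', '```javascript')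
--     if any(m in lowered for m in markers) and ('Write a' in response or 'Create a' in response):
--         return "task_switch_to_code"
--
--     return None
--
--
-- def filter_collapsed(experiences: list, dry_run: bool = True) -> tuple[list, list]:
--     tagged = [(exp, _collapse_reason(exp.get('response', ''))) for exp in experiences]
--     filtered = [exp for exp, reason in tagged if reason is None]
--     removed = []
--     for exp, reason in tagged:
--         if reason is not None:
--             exp['filter_reason'] = reason
--             removed.append(exp)
--     return filtered, removed
-- ===== Notes on version B (the rewrite author's own statement) =====
-- stated objective: alternative
-- what changed: The phrase-repetition count is computed by sorting the 5-word windows and scanning once for the longest run of equal adjacent phrases instead of building a frequency dictionary and taking its maximum value, and the filter partitions via a single tagged detection pass (an Optional-reason helper) instead of an in-loop tuple-destructuring branch.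
import Mathlib
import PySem

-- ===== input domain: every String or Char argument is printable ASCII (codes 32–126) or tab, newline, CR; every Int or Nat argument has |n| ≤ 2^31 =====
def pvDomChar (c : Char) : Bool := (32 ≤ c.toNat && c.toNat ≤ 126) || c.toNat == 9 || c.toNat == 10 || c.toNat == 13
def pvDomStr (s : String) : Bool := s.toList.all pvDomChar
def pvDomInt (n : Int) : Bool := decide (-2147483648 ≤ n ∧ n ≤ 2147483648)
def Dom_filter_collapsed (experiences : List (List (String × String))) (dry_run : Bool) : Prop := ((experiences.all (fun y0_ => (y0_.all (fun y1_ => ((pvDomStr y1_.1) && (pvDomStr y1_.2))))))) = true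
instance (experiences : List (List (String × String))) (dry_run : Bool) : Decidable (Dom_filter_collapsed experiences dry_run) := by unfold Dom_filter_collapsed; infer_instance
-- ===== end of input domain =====

-- B replaces A's phrase-frequency dictionary by a sort-and-scan maximum run and partitions via a
-- tagged list built in one detection pass (objective: alternative). Both A and B mutate the removed
-- dicts in place (adding 'filter_reason'); the equivalence proved here is about the return value.

-- ===== PORT A =====
-- port of detect_collapse_patterns
def detect_collapse_patterns (response : String) : Bool × String :=
  let words := PySem.Str.split₀ (PySem.Str.lower response)
  let pattern1 : Option (Bool × String) :=
    if PySem.List.len words > 20 then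
      let phrases := (PySem.List.pyRange 0 (PySem.List.len words - 5) 1).map
        (fun i => PySem.Str.join " " (PySem.List.slice words (some i) (some (i + 5))))
      let phrase_counts := phrases.foldl (fun d p => d.insert p (d.getD p 0 + 1))
        (PySem.Dict.empty : PySem.Dict String Int)
      let max_repeat : Int := if phrase_counts.items = [] then 0
        else (PySem.List.max? phrase_counts.values id).getD 0
      if max_repeat ≥ 3 then
        some (true, "repetitive_phrase (repeated " ++ PySem.Int.toStr max_repeat ++ "x)")
      else none
    else none
  match pattern1 with
  | some r => r
  | none =>
    let question_count : Int := PySem.Str.count response "?"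
    if question_count > 10 then
      (true, "question_flood (" ++ PySem.Int.toStr question_count ++ " questions)")
    else
      let code_markers := ["def ", "function ", "class ", "import ", "```python", "```javascript"]
      if code_markers.any (fun marker => PySem.Str.isIn marker (PySem.Str.lower response)) then
        if PySem.Str.isIn "Write a" response || PySem.Str.isIn "Create a" response then
          (true, "task_switch_to_code")
        else (false, "")
      else (false, "")

def filter_collapsed (experiences : List (List (String × String))) (dry_run : Bool) : (List (List (String × String))) × (List (List (String × String))) :=
  experiences.foldl (fun acc exp =>
    let res := detect_collapse_patterns ((PySem.Dict.mk exp).getD "response" "")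
    if res.1 then (acc.1, acc.2 ++ [((PySem.Dict.mk exp).insert "filter_reason" res.2).items])
    else (acc.1 ++ [exp], acc.2)) ([], [])

-- ===== PORT B =====
-- the sorted-run scan of Source B (prev/run/max_repeat loop)
def maxRunGo : Option String → Int → Int → List String → Int
  | _, _, best, [] => best
  | prev, run, best, p :: rest =>
    let run' := if some p == prev then run + 1 else 1
    maxRunGo (some p) run' (max best run') rest

-- port of _collapse_reason
def collapse_reason (response : String) : Option String :=
  let lowered := PySem.Str.lower response
  let words := PySem.Str.split₀ lowered
  let pattern1 : Option String :=
    if PySem.List.len words > 20 then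
      let runs := PySem.List.sorted ((PySem.List.pyRange 0 (PySem.List.len words - 5) 1).map
        (fun i => PySem.Str.join " " (PySem.List.slice words (some i) (some (i + 5))))) id
      let max_repeat := maxRunGo none 0 0 runs
      if max_repeat ≥ 3 then
        some ("repetitive_phrase (repeated " ++ PySem.Int.toStr max_repeat ++ "x)")
      else none
    else none
  match pattern1 with
  | some r => some r
  | none =>
    let question_count : Int := PySem.Str.count response "?"
    if question_count > 10 then
      some ("question_flood (" ++ PySem.Int.toStr question_count ++ " questions)")
    else
      let markers := ["def ", "function ", "class ", "import ", "```python", "```javascript"]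
      if (markers.any (fun m => PySem.Str.isIn m lowered))
          && (PySem.Str.isIn "Write a" response || PySem.Str.isIn "Create a" response) then
        some "task_switch_to_code"
      else none

def filter_collapsed_alt (experiences : List (List (String × String))) (dry_run : Bool) : (List (List (String × String))) × (List (List (String × String))) :=
  let tagged := experiences.map (fun exp => (exp, collapse_reason ((PySem.Dict.mk exp).getD "response" "")))
  let filtered := (tagged.filter (fun t => t.2.isNone)).map (·.1)
  let removed := tagged.foldl (fun acc t =>
    match t.2 with
    | some reason => acc ++ [((PySem.Dict.mk t.1).insert "filter_reason" reason).items]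
    | none => acc) []
  (filtered, removed)

-- ===== PRECONDITION & SPEC =====
def Spec_filter_collapsed (experiences : List (List (String × String))) (dry_run : Bool) (out : (List (List (String × String))) × (List (List (String × String)))) : Prop := out = filter_collapsed_alt experiences dry_run
instance (experiences : List (List (String × String))) (dry_run : Bool) (out : (List (List (String × String))) × (List (List (String × String)))) : Decidable (Spec_filter_collapsed experiences dry_run out) := by unfold Spec_filter_collapsed; infer_instance

-- ===== CLAIM (what is proved, stated in full; the proofs are below) =====
def Claim_equal_filter_collapsed : Prop := ∀ (experiences : List (List (String × String))) (dry_run : Bool), Dom_filter_collapsed experiences dry_run → Spec_filter_collapsed experiences dry_run (filter_collapsed experiences dry_run)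

-- ===== LEMMAS AND PROOFS =====

-- fold max with 0: the supremum of a list of Ints together with 0
def fm (l : List Int) : Int := l.foldr max 0

lemma fm_nonneg (l : List Int) : 0 ≤ fm l := by
  induction l with
  | nil => simp [fm]
  | cons x t ih => simp only [fm, List.foldr] at *; omega

lemma le_fm {l : List Int} {x : Int} (h : x ∈ l) : x ≤ fm l := by
  induction l with
  | nil => simp at h
  | cons y t ih =>
    rcases List.mem_cons.mp h with rfl | h
    · simp only [fm, List.foldr]; omega
    · have := ih h; simp only [fm, List.foldr] at *; omega

lemma fm_le {l : List Int} {m : Int} (h0 : 0 ≤ m) (h : ∀ x ∈ l, x ≤ m) : fm l ≤ m := by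
  induction l with
  | nil => simpa [fm]
  | cons y t ih =>
    have hy := h y (by simp)
    have := ih (fun x hx => h x (by simp [hx]))
    simp only [fm, List.foldr] at *; omega

lemma fm_eq_of_mem_iff {l₁ l₂ : List Int} (h : ∀ x, x ∈ l₁ ↔ x ∈ l₂) : fm l₁ = fm l₂ := by
  have h12 : fm l₁ ≤ fm l₂ := fm_le (fm_nonneg _) (fun x hx => le_fm ((h x).mp hx))
  have h21 : fm l₂ ≤ fm l₁ := fm_le (fm_nonneg _) (fun x hx => le_fm ((h x).mpr hx))
  omega

-- the maximal multiplicity in s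
def M (s : List String) : Int := fm (s.map (fun k => (s.count k : Int)))

lemma M_perm {s t : List String} (h : s.Perm t) : M s = M t := by
  unfold M
  apply fm_eq_of_mem_iff
  intro x
  simp only [List.mem_map]
  constructor
  · rintro ⟨k, hk, rfl⟩; exact ⟨k, h.mem_iff.mp hk, by rw [h.count_eq]⟩
  · rintro ⟨k, hk, rfl⟩; exact ⟨k, h.mem_iff.mpr hk, by rw [h.count_eq]⟩

lemma maxRunGo_best (s : List String) : ∀ prev r b₁ b₂,
    maxRunGo prev r (max b₁ b₂) s = max b₁ (maxRunGo prev r b₂ s) := by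
  induction s with
  | nil => intro prev r b₁ b₂; simp [maxRunGo]
  | cons p t ih =>
    intro prev r b₁ b₂
    simp only [maxRunGo]
    rw [show max (max b₁ b₂) (if some p == prev then r + 1 else 1)
        = max b₁ (max b₂ (if some p == prev then r + 1 else 1)) from by omega]
    exact ih _ _ _ _

lemma maxRunGo_replicate (n : Nat) : ∀ (p : String) (r b : Int) (s' : List String),
    maxRunGo (some p) r (max b r) (List.replicate n p ++ s')
      = maxRunGo (some p) (r + n) (max b (r + n)) s' := by
  induction n with
  | zero => intro p r b s'; simp
  | succ n ih =>
    intro p r b s'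
    rw [List.replicate_succ, List.cons_append]
    simp only [maxRunGo]
    rw [if_pos (by simp)]
    rw [show max (max b r) (r + 1) = max b (r + 1) from by omega]
    rw [ih p (r + 1) b s']
    congr 1 <;> push_cast <;> omega

lemma maxRunGo_reset {p : String} {s' : List String} (hp : p ∉ s') (r b : Int) :
    maxRunGo (some p) r b s' = maxRunGo none 0 b s' := by
  cases s' with
  | nil => rfl
  | cons x t =>
    have hxp : x ≠ p := fun h => hp (h ▸ List.mem_cons_self)
    simp only [maxRunGo]
    rw [if_neg (by simpa using hxp), if_neg (by simp)]

-- in a sorted list the head never reappears after the initial block of copies of it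
lemma not_mem_dropWhile {p : String} {t : List String}
    (h : List.Pairwise (· ≤ ·) (p :: t)) :
    p ∉ (p :: t).dropWhile (fun x => x == p) := by
  intro hmem
  cases hd : (p :: t).dropWhile (fun x => x == p) with
  | nil => rw [hd] at hmem; simp at hmem
  | cons x rest =>
    rw [hd] at hmem
    have hdne : (p :: t).dropWhile (fun x => x == p) ≠ [] := by rw [hd]; simp
    have hx := List.head_dropWhile_not (fun x => x == p) hdne
    simp only [hd, List.head_cons] at hx
    have hxp : x ≠ p := by simpa using hx
    have hsub : (x :: rest).Sublist (p :: t) := hd ▸ List.dropWhile_sublist _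
    have hpd : List.Pairwise (· ≤ ·) (x :: rest) := h.sublist hsub
    rcases List.mem_cons.mp hmem with h1 | h2
    · exact hxp h1.symm
    · have h3 : x ≤ p := (List.pairwise_cons.mp hpd).1 p h2
      have hmem' : x ∈ p :: t := hsub.mem List.mem_cons_self
      have h4 : p ≤ x := by
        rcases List.mem_cons.mp hmem' with h5 | h5
        · exact absurd h5 hxp
        · exact (List.pairwise_cons.mp h).1 _ h5
      exact hxp (le_antisymm h3 h4)

-- sorted decomposition: a sorted nonempty list is (count of its head) copies of the head
-- followed by a sorted remainder not containing the head
lemma sorted_decomp {p : String} {t : List String} (h : List.Pairwise (· ≤ ·) (p :: t)) :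
    ∃ s' : List String, p :: t = List.replicate ((p :: t).count p) p ++ s' ∧ p ∉ s' ∧
      List.Pairwise (· ≤ ·) s' ∧ s'.length < (p :: t).length := by
  refine ⟨(p :: t).dropWhile (fun x => x == p), ?_, not_mem_dropWhile h, ?_, ?_⟩
  · -- the decomposition equation
    have hall : ∀ x ∈ (p :: t).takeWhile (fun x => x == p), x = p := by
      intro x hx
      have := List.mem_takeWhile_imp hx
      simpa using this
    have hrep : (p :: t).takeWhile (fun x => x == p)
        = List.replicate ((p :: t).takeWhile (fun x => x == p)).length p :=
      List.eq_replicate_of_mem hall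
    have hcnt : (p :: t).count p = ((p :: t).takeWhile (fun x => x == p)).length := by
      conv_lhs => rw [← List.takeWhile_append_dropWhile (p := fun x => x == p) (l := p :: t)]
      rw [List.count_append, List.count_eq_zero.mpr (not_mem_dropWhile h), Nat.add_zero]
      conv_lhs => rw [hrep]
      rw [List.count_replicate, if_pos (by simp)]
    rw [hcnt, ← hrep]
    exact (List.takeWhile_append_dropWhile (p := fun x => x == p) (l := p :: t)).symm
  · exact h.sublist (List.dropWhile_sublist _)
  · have hne : (p :: t).dropWhile (fun x => x == p) = t.dropWhile (fun x => x == p) := by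
      rw [List.dropWhile_cons, if_pos (by simp)]
    have := (List.dropWhile_sublist (l := t) (p := fun x => x == p)).length_le
    simp [hne]; omega

lemma go_eq_M : ∀ (n : Nat) (s : List String), s.length ≤ n → List.Pairwise (· ≤ ·) s →
    maxRunGo none 0 0 s = M s := by
  intro n
  induction n with
  | zero =>
    intro s hlen _
    have : s = [] := List.eq_nil_of_length_eq_zero (by omega)
    subst this; rfl
  | succ n ih =>
    intro s hlen hsorted
    cases s with
    | nil => rfl
    | cons p t =>
      obtain ⟨s', hdecomp, hnotmem, hsorted', hlt⟩ := sorted_decomp hsorted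
      set c : Nat := (p :: t).count p with hc
      have hc1 : 1 ≤ c := by
        have : p ∈ p :: t := List.mem_cons_self
        simpa [hc] using List.count_pos_iff.mpr this
      -- run the scan through the replicate block
      have hrep : List.replicate c p = p :: List.replicate (c - 1) p := by
        rw [← List.replicate_succ]; congr 1; omega
      have step1 : maxRunGo none 0 0 (p :: t)
          = maxRunGo (some p) 1 (max 0 1) (List.replicate (c - 1) p ++ s') := by
        conv_lhs => rw [hdecomp, hrep]
        simp only [List.cons_append, maxRunGo, Option.beq_none]
        rw [if_neg (by simp)]
      have step2 : maxRunGo (some p) 1 (max 0 1) (List.replicate (c - 1) p ++ s')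
          = maxRunGo (some p) (1 + (c - 1 : Nat)) (max 0 (1 + (c - 1 : Nat))) s' :=
        maxRunGo_replicate (c - 1) p 1 0 s'
      have hcast : (1 : Int) + (c - 1 : Nat) = (c : Int) := by
        have : (c : Int) ≥ 1 := by exact_mod_cast hc1
        push_cast [Nat.cast_sub hc1]; ring
      have step3 : maxRunGo (some p) (c : Int) (max 0 (c : Int)) s'
          = maxRunGo none 0 (max 0 (c : Int)) s' := maxRunGo_reset hnotmem _ _
      have step4 : maxRunGo none 0 (max (c : Int) 0) s' = max (c : Int) (maxRunGo none 0 0 s') :=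
        maxRunGo_best s' none 0 (c : Int) 0
      have ihs : maxRunGo none 0 0 s' = M s' := ih s' (by simp at hlen hlt ⊢; omega) hsorted'
      -- the count side: M (p :: t) = max c (M s')
      have hcount : ∀ k, k ≠ p → (p :: t).count k = s'.count k := by
        intro k hk
        rw [hdecomp, List.count_append, List.count_replicate, if_neg (by simpa using Ne.symm hk)]
        simp
      have hmemS : ∀ k, k ∈ (p :: t) → k = p ∨ k ∈ s' := by
        intro k hk
        rw [hdecomp] at hk
        rcases List.mem_append.mp hk with h1 | h2
        · exact Or.inl (List.eq_of_mem_replicate h1)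
        · exact Or.inr h2
      have hmemS' : ∀ k, k ∈ s' → k ∈ (p :: t) := by
        intro k hk; rw [hdecomp]; exact List.mem_append_right _ hk
      have hM : M (p :: t) = max (c : Int) (M s') := by
        have hle1 : M (p :: t) ≤ max (c : Int) (M s') := by
          apply fm_le (by have := fm_nonneg (s'.map (fun k => (s'.count k : Int))); unfold M; omega)
          intro x hx
          simp only [List.mem_map] at hx
          obtain ⟨k, hk, rfl⟩ := hx
          rcases hmemS k hk with rfl | hk'
          · simp only [← hc]; omega
          · have hkp : k ≠ p := fun h => hnotmem (h ▸ hk')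
            rw [hcount k hkp]
            have : (s'.count k : Int) ≤ M s' :=
              le_fm (List.mem_map.mpr ⟨k, hk', rfl⟩)
            omega
        have hle2 : max (c : Int) (M s') ≤ M (p :: t) := by
          have h1 : (c : Int) ≤ M (p :: t) :=
            le_fm (List.mem_map.mpr ⟨p, List.mem_cons_self, by rw [← hc]⟩)
          have h2 : M s' ≤ M (p :: t) := by
            apply fm_le (fm_nonneg _)
            intro x hx
            simp only [List.mem_map] at hx
            obtain ⟨k, hk, rfl⟩ := hx
            have hkp : k ≠ p := fun h => hnotmem (h ▸ hk)
            have : (s'.count k : Int) = ((p :: t).count k : Int) := by rw [hcount k hkp]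
            rw [this]
            exact le_fm (List.mem_map.mpr ⟨k, hmemS' k hk, rfl⟩)
          omega
        omega
      calc maxRunGo none 0 0 (p :: t)
          = maxRunGo (some p) (c : Int) (max 0 (c : Int)) s' := by
            rw [step1, step2, hcast]
        _ = max (c : Int) (M s') := by
            rw [step3, show max 0 (c : Int) = max (c : Int) 0 from by omega, step4, ihs]
        _ = M (p :: t) := hM.symm

-- A's dictionary maximum equals B's sorted-run maximum, for any phrase list
lemma maxrep_eq (ps : List String) :
    (if (ps.foldl (fun d p => d.insert p (d.getD p 0 + 1))
          (PySem.Dict.empty : PySem.Dict String Int)).items = [] then (0 : Int)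
      else (PySem.List.max? (ps.foldl (fun d p => d.insert p (d.getD p 0 + 1))
          (PySem.Dict.empty : PySem.Dict String Int)).values id).getD 0)
    = maxRunGo none 0 0 (PySem.List.sorted ps id) := by
  rw [PySem.Dict.foldl_insert_getD_add_one_eq_counter]
  have hperm := PySem.List.sorted_perm ps id false
  have hrhs : maxRunGo none 0 0 (PySem.List.sorted ps id) = M ps := by
    rw [go_eq_M (PySem.List.sorted ps id).length _ le_rfl
        (by simpa using PySem.List.sorted_pairwise ps id)]
    exact M_perm hperm
  rw [hrhs]
  have hvalues : (PySem.Dict.counter ps).values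
      = (PySem.Set.ofList ps).map (fun k => ((ps.count k : Nat) : Int)) := by
    simp [PySem.Dict.values, PySem.Dict.items_counter, List.map_map, Function.comp]
  cases hps : ps with
  | nil => simp [PySem.Dict.items_counter, M, fm, PySem.Set.ofList]
  | cons q qs =>
    rw [← hps]
    have hne : ps ≠ [] := by rw [hps]; simp
    have hofne : PySem.Set.ofList ps ≠ [] := by
      intro h0
      have : q ∈ PySem.Set.ofList ps := (PySem.Set.mem_ofList ps q).mpr (by rw [hps]; simp)
      rw [h0] at this; simp at this
    have hitems : (PySem.Dict.counter ps).items ≠ [] := by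
      rw [PySem.Dict.items_counter]
      simpa using hofne
    rw [if_neg hitems]
    -- max? returns some m; m equals fm of the value list
    cases hmax : PySem.List.max? (PySem.Dict.counter ps).values id with
    | none =>
      exfalso
      have := (PySem.List.max?_eq_none_iff (PySem.Dict.counter ps).values id).mp hmax
      rw [hvalues] at this
      exact hofne (List.map_eq_nil_iff.mp this)
    | some m =>
      have hmem : m ∈ (PySem.Dict.counter ps).values := PySem.List.max?_mem hmax
      have hub : ∀ y ∈ (PySem.Dict.counter ps).values, y ≤ m := by
        intro y hy
        simpa using PySem.List.max?_isMax hmax y hy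
      -- every value is a count of a member, hence ≥ 1
      have hpos : ∀ y ∈ (PySem.Dict.counter ps).values, (0 : Int) ≤ y := by
        intro y hy
        rw [hvalues] at hy
        obtain ⟨k, _, rfl⟩ := List.mem_map.mp hy
        positivity
      have h0m : (0 : Int) ≤ m := hpos m hmem
      have hmemiff : ∀ x : Int, x ∈ (PySem.Dict.counter ps).values
          ↔ x ∈ ps.map (fun k => (ps.count k : Int)) := by
        intro x
        rw [hvalues]
        simp only [List.mem_map]
        constructor
        · rintro ⟨k, hk, rfl⟩; exact ⟨k, (PySem.Set.mem_ofList ps k).mp hk, rfl⟩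
        · rintro ⟨k, hk, rfl⟩; exact ⟨k, (PySem.Set.mem_ofList ps k).mpr hk, rfl⟩
      have hfm : fm (PySem.Dict.counter ps).values = M ps := fm_eq_of_mem_iff hmemiff
      have h1 : m ≤ fm (PySem.Dict.counter ps).values := le_fm hmem
      have h2 : fm (PySem.Dict.counter ps).values ≤ m := fm_le h0m hub
      simp only [Option.getD_some]
      omega

-- the question-flood / code-marker tail of both detectors agrees
lemma tail_eq (response : String) :
    (match (none : Option (Bool × String)) with
     | some r => r
     | none =>
       let question_count : Int := PySem.Str.count response "?"
       if question_count > 10 then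
         (true, "question_flood (" ++ PySem.Int.toStr question_count ++ " questions)")
       else
         let code_markers := ["def ", "function ", "class ", "import ", "```python", "```javascript"]
         if code_markers.any (fun marker => PySem.Str.isIn marker (PySem.Str.lower response)) then
           if PySem.Str.isIn "Write a" response || PySem.Str.isIn "Create a" response then
             (true, "task_switch_to_code")
           else (false, "")
         else (false, ""))
    = (match (match (none : Option String) with
       | some r => some r
       | none =>
         let question_count : Int := PySem.Str.count response "?"
         if question_count > 10 then
           some ("question_flood (" ++ PySem.Int.toStr question_count ++ " questions)")
         else
           let markers := ["def ", "function ", "class ", "import ", "```python", "```javascript"]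
           if (markers.any (fun m => PySem.Str.isIn m (PySem.Str.lower response)))
               && (PySem.Str.isIn "Write a" response || PySem.Str.isIn "Create a" response) then
             some "task_switch_to_code"
           else none) with
       | some r => (true, r)
       | none => (false, "")) := by
  simp only []
  by_cases hq : (PySem.Str.count response "?" : Int) > 10
  · rw [if_pos hq, if_pos hq]
  · rw [if_neg hq, if_neg hq]
    cases hany : (["def ", "function ", "class ", "import ", "```python", "```javascript"].any
        (fun m => PySem.Str.isIn m (PySem.Str.lower response))) with
    | false => simp
    | true =>
      cases hwc : (PySem.Str.isIn "Write a" response || PySem.Str.isIn "Create a" response) with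
      | false => simp
      | true => simp

-- detection agreement: A's pair is B's option, rendered
lemma detect_eq (response : String) :
    detect_collapse_patterns response
      = (match collapse_reason response with
         | some r => (true, r)
         | none => (false, "")) := by
  unfold detect_collapse_patterns collapse_reason
  simp only []
  rw [maxrep_eq]
  by_cases h20 : PySem.List.len (PySem.Str.split₀ (PySem.Str.lower response)) > 20
  · rw [if_pos h20, if_pos h20]
    by_cases h3 : maxRunGo none 0 0 (PySem.List.sorted
        ((PySem.List.pyRange 0 (PySem.List.len (PySem.Str.split₀ (PySem.Str.lower response)) - 5) 1).map
          (fun i => PySem.Str.join " " (PySem.List.slice (PySem.Str.split₀ (PySem.Str.lower response))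
            (some i) (some (i + 5))))) id) ≥ 3
    · rw [if_pos h3, if_pos h3]
    · rw [if_neg h3, if_neg h3]
      exact tail_eq response
  · rw [if_neg h20, if_neg h20]
    exact tail_eq response

-- accumulator form of the main loops, for an abstract detector pair
lemma fold_eq (dA : List (String × String) → Bool × String)
    (dB : List (String × String) → Option String)
    (h : ∀ e, dA e = (match dB e with | some r => (true, r) | none => (false, "")))
    (exps : List (List (String × String))) :
    ∀ (f0 r0 : List (List (String × String))),
    exps.foldl (fun acc exp =>
        if (dA exp).1 then (acc.1, acc.2 ++ [((PySem.Dict.mk exp).insert "filter_reason" (dA exp).2).items])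
        else (acc.1 ++ [exp], acc.2)) (f0, r0)
      = (f0 ++ ((exps.map (fun exp => (exp, dB exp))).filter (fun t => t.2.isNone)).map (·.1),
         r0 ++ (exps.map (fun exp => (exp, dB exp))).foldl
            (fun acc t =>
              match t.2 with
              | some reason => acc ++ [((PySem.Dict.mk t.1).insert "filter_reason" reason).items]
              | none => acc) []) := by
  induction exps with
  | nil => intro f0 r0; simp
  | cons exp rest ih =>
    intro f0 r0
    simp only [List.foldl_cons, List.map_cons, List.filter_cons]
    rw [h exp]
    cases hr : dB exp with
    | none =>
      simp only [Option.isNone_none, Bool.false_eq_true, if_false, if_true]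
      rw [ih (f0 ++ [exp]) r0]
      simp
    | some reason =>
      simp only [Option.isNone_some, Bool.false_eq_true, if_false, if_true]
      rw [ih f0 (r0 ++ [((PySem.Dict.mk exp).insert "filter_reason" reason).items])]
      have hshift : ∀ (l : List ((List (String × String)) × Option String)) (a : List (List (String × String))),
          l.foldl (fun acc t =>
            match t.2 with
            | some reason => acc ++ [((PySem.Dict.mk t.1).insert "filter_reason" reason).items]
            | none => acc) a
          = a ++ l.foldl (fun acc t =>
            match t.2 with
            | some reason => acc ++ [((PySem.Dict.mk t.1).insert "filter_reason" reason).items]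
            | none => acc) [] := by
        intro l
        induction l with
        | nil => intro a; simp
        | cons t ts ihl =>
          intro a
          obtain ⟨te, tb⟩ := t
          cases tb with
          | none => simp only [List.foldl_cons]; exact ihl a
          | some reason =>
            simp only [List.foldl_cons, List.nil_append]
            rw [ihl (a ++ [((PySem.Dict.mk te).insert "filter_reason" reason).items]),
                ihl [((PySem.Dict.mk te).insert "filter_reason" reason).items]]
            simp
      simp only [List.nil_append]
      rw [hshift _ [((PySem.Dict.mk exp).insert "filter_reason" reason).items]]
      simp

-- ===== VERDICT (by name: the statement is the Claim_ definition above) =====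
set_option maxHeartbeats 2000000 in
theorem filter_collapsed_spec : Claim_equal_filter_collapsed := by
  intro experiences dry_run _
  unfold Spec_filter_collapsed filter_collapsed filter_collapsed_alt
  have h := fold_eq
      (fun exp => detect_collapse_patterns ((PySem.Dict.mk exp).getD "response" ""))
      (fun exp => collapse_reason ((PySem.Dict.mk exp).getD "response" ""))
      (fun e => detect_eq _) experiences [] []
  dsimp only at h ⊢
  rw [h]
  simp only [List.nil_append]
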